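-- pv_equiv track=rewrite | github.com/jshilkova/advent_of_code | 14/14.2.py | roll_stones_north
-- ===== SOURCE A (Python) =====
-- def roll_stones_north(field):
--     n = len(field)
--     m = len(field[0])
--     round_stones_count = count_round_stones_vert(field, m, n)
--
--     for j in range(0, m):
--         i = 0
--         for num in round_stones_count[j]:
--             for x in range(num):
--                 field[i][j] = 'O'
--                 i += 1
--
--             while i < n and field[i][j] != '#':
--                 field[i][j] = '.'
--                 i += 1
--             if i < n and field[i][j] == '#':
--                 i += 1
--     return field
--
-- def count_round_stones_vert(field, m, n):
--     round_stones_count = [[] for _j in range(m)]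
--     for j in range(0, m):
--         r = 0
--         for i in range(0, n):
--             if field[i][j] == 'O':
--                 r += 1
--             if field[i][j] == '#':
--                 round_stones_count[j].append(r)
--                 r = 0
--         round_stones_count[j].append(r)
--     return round_stones_count
-- ===== SOURCE B (Python) =====
-- def roll_stones_north(field):
--     n = len(field)
--     m = len(field[0])
--     for j in range(m):
--         w = 0
--         for i in range(n):
--             c = field[i][j]
--             if c == '#':
--                 w = i + 1
--             else:
--                 field[i][j] = '.'
--                 if c == 'O':
--                     field[w][j] = 'O'
--                     w += 1
--     return field
-- ===== Notes on version B (the rewrite author's own statement) =====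
-- stated objective: simpler
-- what changed: Drops the count_round_stones_vert pre-pass and segment-filling loops; B compacts each column in a single top-down pass with a write pointer that resets after each '#'.
import Mathlib
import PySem

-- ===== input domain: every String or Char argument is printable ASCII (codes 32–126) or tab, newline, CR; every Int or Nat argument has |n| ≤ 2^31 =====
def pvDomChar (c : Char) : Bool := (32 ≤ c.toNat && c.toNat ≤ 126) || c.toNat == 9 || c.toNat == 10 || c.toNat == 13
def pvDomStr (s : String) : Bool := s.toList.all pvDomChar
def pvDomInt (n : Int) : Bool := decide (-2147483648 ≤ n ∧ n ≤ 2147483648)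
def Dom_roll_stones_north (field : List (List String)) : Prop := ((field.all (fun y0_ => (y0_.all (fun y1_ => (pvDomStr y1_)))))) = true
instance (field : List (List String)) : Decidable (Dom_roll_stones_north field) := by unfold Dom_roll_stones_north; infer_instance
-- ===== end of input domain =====

-- B replaces A's per-column counting pre-pass + segment-filling loops by a single write-pointer
-- compaction pass per column (objective: simpler).  Both Pythons mutate `field` in place the same
-- way and return it; the theorems are about the returned value.

-- shared cell access: field[i][j] read / write
def pvGetC (g : List (List String)) (i j : Nat) : String := (g.getD i []).getD j ""
def pvSetC (g : List (List String)) (i j : Nat) (v : String) : List (List String) :=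
  g.modify i (fun row => row.set j v)

-- ===== PORT A =====
def pvCountColA (field : List (List String)) (n j : Nat) : List Nat :=
  let p := (List.range n).foldl (fun (p : Nat × List Nat) i =>
    let r := if pvGetC field i j = "O" then p.1 + 1 else p.1
    if pvGetC field i j = "#" then (0, p.2 ++ [r]) else (r, p.2)) (0, [])
  p.2 ++ [p.1]

def count_round_stones_vert (field : List (List String)) (m n : Nat) : List (List Nat) :=
  (List.range m).map (fun j => pvCountColA field n j)

def pvWhileDots (j n : Nat) : Nat → List (List String) → Nat → List (List String) × Nat
  | 0, g, i => (g, i)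
  | fuel + 1, g, i =>
    if i < n ∧ pvGetC g i j ≠ "#" then pvWhileDots j n fuel (pvSetC g i j ".") (i + 1) else (g, i)

def pvBodyA (j n : Nat) (p : List (List String) × Nat) (num : Nat) : List (List String) × Nat :=
  let p1 := (List.range num).foldl (fun (q : List (List String) × Nat) _ => (pvSetC q.1 q.2 j "O", q.2 + 1)) p
  let p2 := pvWhileDots j n n p1.1 p1.2
  if p2.2 < n ∧ pvGetC p2.1 p2.2 j = "#" then (p2.1, p2.2 + 1) else p2

def roll_stones_north (field : List (List String)) : List (List String) :=
  let n := field.length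
  let m := (field.headD []).length
  let counts := count_round_stones_vert field m n
  (List.range m).foldl (fun g j => (((counts.getD j []).foldl (pvBodyA j n) (g, 0))).1) field

-- ===== PORT B =====
def pvBodyB (j : Nat) (p : List (List String) × Nat) (i : Nat) : List (List String) × Nat :=
  let c := pvGetC p.1 i j
  if c = "#" then (p.1, i + 1)
  else
    let g := pvSetC p.1 i j "."
    if c = "O" then (pvSetC g p.2 j "O", p.2 + 1) else (g, p.2)

def roll_stones_north_alt (field : List (List String)) : List (List String) :=
  let n := field.length
  let m := (field.headD []).length
  (List.range m).foldl (fun g j => (((List.range n).foldl (pvBodyB j) (g, 0))).1) field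

-- ===== PRECONDITION & SPEC =====
-- Exactly the inputs Python A returns on: field[0] must exist (else IndexError) and every row
-- must reach every column j < len(field[0]) (else IndexError); rows longer than field[0] are fine.
def Pre_roll_stones_north (field : List (List String)) : Prop :=
  field ≠ [] ∧ ∀ row ∈ field, (field.headD []).length ≤ row.length
instance (field : List (List String)) : Decidable (Pre_roll_stones_north field) := by
  unfold Pre_roll_stones_north; infer_instance

def pvWitness_roll_stones_north : List (List String) :=
  [[".", "O"], ["O", "#"], [".", "O"]]

def Spec_roll_stones_north (field : List (List String)) (out : List (List String)) : Prop := out = roll_stones_north_alt field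
instance (field : List (List String)) (out : List (List String)) : Decidable (Spec_roll_stones_north field out) := by unfold Spec_roll_stones_north; infer_instance

-- ===== CLAIM (what is proved, stated in full; the proofs are below) =====
def Claim_equal_roll_stones_north : Prop := ∀ (field : List (List String)), Dom_roll_stones_north field → Pre_roll_stones_north field → Spec_roll_stones_north field (roll_stones_north field)

-- ===== LEMMAS AND PROOFS =====

-- proof-side view: a grid column as a list, and writing a column back
def pvCol (g : List (List String)) (j : Nat) : List String := g.map (fun row => row.getD j "")
def pvWriteCol (g : List (List String)) (j : Nat) (c : List String) : List (List String) :=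
  List.zipWith (fun row v => row.set j v) g c

def pvWhile1 (n : Nat) : Nat → List String → Nat → List String × Nat
  | 0, l, i => (l, i)
  | fuel + 1, l, i =>
    if i < n ∧ l.getD i "" ≠ "#" then pvWhile1 n fuel (l.set i ".") (i + 1) else (l, i)

def pvBodyA1 (n : Nat) (p : List String × Nat) (num : Nat) : List String × Nat :=
  let p1 := (List.range num).foldl (fun (q : List String × Nat) _ => (q.1.set q.2 "O", q.2 + 1)) p
  let p2 := pvWhile1 n n p1.1 p1.2
  if p2.2 < n ∧ p2.1.getD p2.2 "" = "#" then (p2.1, p2.2 + 1) else p2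

def pvBodyB1 (p : List String × Nat) (i : Nat) : List String × Nat :=
  let c := p.1.getD i ""
  if c = "#" then (p.1, i + 1)
  else
    let l := p.1.set i "."
    if c = "O" then (l.set p.2 "O", p.2 + 1) else (l, p.2)

def pvCountAux : List String → Nat → List Nat
  | [], r => [r]
  | x :: xs, r =>
    let r' := if x = "O" then r + 1 else r
    if x = "#" then r' :: pvCountAux xs 0 else pvCountAux xs r'

def pvRoll (c : List String) : List String :=
  let s := c.takeWhile (fun x => x ≠ "#")
  let k := s.count "O"
  let filled := List.replicate k "O" ++ List.replicate (s.length - k) "."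
  match h : c.dropWhile (fun x => x ≠ "#") with
  | [] => filled
  | _ :: rest => filled ++ "#" :: pvRoll rest
termination_by c.length
decreasing_by
  have h1 : (c.dropWhile (fun x => decide (x ≠ "#"))).length ≤ c.length := List.length_dropWhile_le _ _
  simp_all

theorem pv_writeCol_length (g : List (List String)) (j : Nat) (c : List String)
    (hc : c.length = g.length) : (pvWriteCol g j c).length = g.length := by
  simp [pvWriteCol, hc]

theorem pv_getC_col (g : List (List String)) (i j : Nat) :
    pvGetC g i j = (pvCol g j).getD i "" := by
  simp [pvGetC, pvCol, List.getD]
  rcases h : g[i]? with _ | row <;> simp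

theorem pv_getC_writeCol (g : List (List String)) (j : Nat) (c : List String) (i : Nat)
    (hd : ∀ row ∈ g, j < row.length) (hc : c.length = g.length) :
    pvGetC (pvWriteCol g j c) i j = c.getD i "" := by
  simp only [pvGetC, pvWriteCol, List.getD]
  by_cases hi : i < g.length
  · have h1 : i < (List.zipWith (fun row v => row.set j v) g c).length := by simp [hc, hi]
    rw [List.getElem?_eq_getElem h1, List.getElem?_eq_getElem (show i < c.length by omega)]
    simp only [List.getElem_zipWith, Option.getD_some]
    have hic : i < c.length := by omega
    have h2 : j < (List.set (g.get ⟨i, hi⟩) j (c.get ⟨i, hic⟩)).length := by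
      rw [List.length_set]; exact hd _ (List.getElem_mem hi)
    simp only [List.get_eq_getElem] at h2
    rw [List.getElem?_eq_getElem h2]
    simp [List.getElem_set]
  · rw [List.getElem?_eq_none (l := List.zipWith (fun row v => row.set j v) g c) (by simp; omega),
        List.getElem?_eq_none (show c.length ≤ i by omega)]
    simp

theorem pv_setC_writeCol (g : List (List String)) (j : Nat) (c : List String) (i : Nat) (v : String)
    (hc : c.length = g.length) :
    pvSetC (pvWriteCol g j c) i j v = pvWriteCol g j (c.set i v) := by
  apply List.ext_getElem
  · simp [pvSetC, pvWriteCol]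
  · intro k h1 h2
    simp only [pvSetC, pvWriteCol, List.getElem_modify, List.getElem_zipWith] at *
    by_cases hk : i = k <;> simp [hk, List.getElem_set]

theorem pv_writeCol_col (g : List (List String)) (j : Nat)
    (hd : ∀ row ∈ g, j < row.length) : pvWriteCol g j (pvCol g j) = g := by
  apply List.ext_getElem
  · simp [pvWriteCol, pvCol]
  · intro k h1 h2
    simp only [pvWriteCol, pvCol, List.getElem_zipWith, List.getElem_map]
    rw [List.getD_eq_getElem _ _ (hd _ (List.getElem_mem _))]
    exact List.set_getElem_self _

theorem pv_col_writeCol_ne (g : List (List String)) (j j' : Nat) (c : List String)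
    (hne : j' ≠ j) (hc : c.length = g.length) : pvCol (pvWriteCol g j c) j' = pvCol g j' := by
  apply List.ext_getElem
  · simp [pvCol, pvWriteCol, hc]
  · intro k h1 h2
    simp only [pvCol, pvWriteCol, List.getElem_map, List.getElem_zipWith]
    simp only [List.getD]
    rw [List.getElem?_set_ne (by omega)]

theorem pv_writeCol_rows (g : List (List String)) (j : Nat) (c : List String) :
    ∀ row' ∈ pvWriteCol g j c, ∃ row ∈ g, row'.length = row.length := by
  intro row' hmem
  simp only [pvWriteCol, List.mem_iff_getElem] at hmem
  obtain ⟨k, hk, hrow⟩ := hmem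
  simp only [List.getElem_zipWith] at hrow
  refine ⟨g[k]'(by simp at hk; omega), List.getElem_mem _, ?_⟩
  rw [← hrow, List.length_set]

theorem pv_foldl_fst_len {α : Type} (f1 : List String × Nat → α → List String × Nat)
    (H : ∀ p a, ((f1 p a).1).length = p.1.length) :
    ∀ (l : List α) (p : List String × Nat), ((l.foldl f1 p).1).length = p.1.length := by
  intro l
  induction l with
  | nil => intro p; rfl
  | cons a l ih => intro p; rw [List.foldl_cons, ih, H]

theorem pv_foldl_lift {α : Type} (g : List (List String)) (j : Nat)
    (fG : List (List String) × Nat → α → List (List String) × Nat)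
    (f1 : List String × Nat → α → List String × Nat)
    (H : ∀ c i a, c.length = g.length →
      fG (pvWriteCol g j c, i) a = (pvWriteCol g j ((f1 (c, i) a).1), (f1 (c, i) a).2))
    (Hlen : ∀ c i a, c.length = g.length → ((f1 (c, i) a).1).length = c.length) :
    ∀ (l : List α) (c : List String) (i : Nat), c.length = g.length →
      l.foldl fG (pvWriteCol g j c, i) = (pvWriteCol g j ((l.foldl f1 (c, i)).1), (l.foldl f1 (c, i)).2) := by
  intro l
  induction l with
  | nil => intro c i hc; rfl
  | cons a l ih =>
    intro c i hc
    rw [List.foldl_cons, List.foldl_cons, H c i a hc]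
    have := ih (f1 (c, i) a).1 (f1 (c, i) a).2 (by rw [Hlen c i a hc]; exact hc)
    simpa using this

theorem pv_while1_len (n : Nat) : ∀ (fuel : Nat) (c : List String) (i : Nat),
    ((pvWhile1 n fuel c i).1).length = c.length := by
  intro fuel
  induction fuel with
  | zero => intro c i; rfl
  | succ f ih =>
    intro c i
    rw [pvWhile1]
    split
    · rw [ih, List.length_set]
    · rfl

theorem pv_bodyA1_len (n : Nat) (p : List String × Nat) (num : Nat) :
    ((pvBodyA1 n p num).1).length = p.1.length := by
  rw [pvBodyA1]
  have h1 := pv_foldl_fst_len (fun (q : List String × Nat) _ => (q.1.set q.2 "O", q.2 + 1))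
    (by intro p a; simp [List.length_set]) (List.range num) p
  split <;> simp [pv_while1_len, h1]

theorem pv_bodyB1_len (p : List String × Nat) (i : Nat) :
    ((pvBodyB1 p i).1).length = p.1.length := by
  rw [pvBodyB1]
  split
  · rfl
  · split <;> simp [List.length_set]

theorem pv_whileDots_lift (g : List (List String)) (j n : Nat)
    (hd : ∀ row ∈ g, j < row.length) :
    ∀ (fuel : Nat) (c : List String) (i : Nat), c.length = g.length →
      pvWhileDots j n fuel (pvWriteCol g j c) i
        = (pvWriteCol g j ((pvWhile1 n fuel c i).1), (pvWhile1 n fuel c i).2) := by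
  intro fuel
  induction fuel with
  | zero => intro c i hc; rfl
  | succ f ih =>
    intro c i hc
    rw [pvWhileDots, pvWhile1, pv_getC_writeCol g j c i hd hc]
    split
    · rw [pv_setC_writeCol g j c i "." hc, ih (c.set i ".") (i + 1) (by rw [List.length_set]; exact hc)]
    · rfl

theorem pv_bodyA_lift (g : List (List String)) (j n : Nat)
    (hd : ∀ row ∈ g, j < row.length) (c : List String) (i : Nat) (num : Nat)
    (hc : c.length = g.length) :
    pvBodyA j n (pvWriteCol g j c, i) num
      = (pvWriteCol g j ((pvBodyA1 n (c, i) num).1), (pvBodyA1 n (c, i) num).2) := by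
  rw [pvBodyA, pvBodyA1]
  have hw := pv_foldl_lift g j (fun (q : List (List String) × Nat) _ => (pvSetC q.1 q.2 j "O", q.2 + 1)) (fun (q : List String × Nat) _ => (q.1.set q.2 "O", q.2 + 1))
    (by intro c' i' a hc'; simp only; rw [pv_setC_writeCol g j c' i' "O" hc'])
    (by intro c' i' a hc'; simp [List.length_set])
    (List.range num) c i hc
  simp only at hw ⊢
  rw [hw]
  have hlen1 : (((List.range num).foldl (fun (q : List String × Nat) _ => (q.1.set q.2 "O", q.2 + 1)) (c, i)).1).length = g.length := by
    rw [pv_foldl_fst_len _ (by intro p a; simp [List.length_set])]; exact hc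
  rw [pv_whileDots_lift g j n hd n _ _ hlen1]
  have hlen2 : ((pvWhile1 n n ((List.range num).foldl (fun (q : List String × Nat) _ => (q.1.set q.2 "O", q.2 + 1)) (c, i)).1 ((List.range num).foldl (fun (q : List String × Nat) _ => (q.1.set q.2 "O", q.2 + 1)) (c, i)).2).1).length = g.length := by
    rw [pv_while1_len]; exact hlen1
  rw [pv_getC_writeCol g j _ _ hd hlen2]
  split <;> rfl

theorem pv_bodyB_lift (g : List (List String)) (j : Nat)
    (hd : ∀ row ∈ g, j < row.length) (c : List String) (i k : Nat)
    (hc : c.length = g.length) :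
    pvBodyB j (pvWriteCol g j c, i) k
      = (pvWriteCol g j ((pvBodyB1 (c, i) k).1), (pvBodyB1 (c, i) k).2) := by
  rw [pvBodyB, pvBodyB1]
  simp only [pv_getC_writeCol g j c k hd hc]
  split
  · rfl
  · rw [pv_setC_writeCol g j c k "." hc]
    split
    · rw [pv_setC_writeCol g j (c.set k ".") i "O" (by rw [List.length_set]; exact hc)]
    · rfl

theorem pv_getD_append (a b : List String) (i : Nat) (d : String) :
    (a ++ b).getD (a.length + i) d = b.getD i d := by
  simp [List.getD, List.getElem?_append_right (by omega : a.length ≤ a.length + i)]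

theorem pv_set_append (a b : List String) (i : Nat) (v : String) :
    (a ++ b).set (a.length + i) v = a ++ b.set i v := by
  rw [List.set_append_right _ _ (by omega)]
  simp

theorem pv_writeOs (pre t : List String) :
    ∀ (k : Nat), k ≤ t.length →
    (List.range k).foldl (fun (q : List String × Nat) _ => (q.1.set q.2 "O", q.2 + 1)) (pre ++ t, pre.length)
      = (pre ++ List.replicate k "O" ++ t.drop k, pre.length + k) := by
  intro k
  induction k with
  | zero => intro _; simp
  | succ k ih =>
    intro hk
    rw [List.range_succ, List.foldl_append, ih (by omega)]
    simp only [List.foldl_cons, List.foldl_nil]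
    have h1 : pre ++ List.replicate k "O" ++ t.drop k
        = (pre ++ List.replicate k "O") ++ t.drop k := by simp
    have h2 : pre.length + k = (pre ++ List.replicate k "O").length + 0 := by simp
    rw [h1, h2, pv_set_append]
    rw [List.drop_eq_getElem_cons (by omega : k < t.length)]
    simp only [List.set_cons_zero, Prod.mk.injEq]
    refine ⟨?_, by simp; omega⟩
    rw [List.replicate_succ' (n := k)]
    simp

theorem pv_while1_run (N : Nat) :
    ∀ (d : List String), (∀ x ∈ d, x ≠ "#") →
    ∀ (fuel : Nat) (pre r : List String), d.length ≤ fuel →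
    (r = [] ∨ ∃ r', r = "#" :: r') → N = (pre ++ d ++ r).length →
    pvWhile1 N fuel (pre ++ d ++ r) pre.length
      = (pre ++ List.replicate d.length "." ++ r, pre.length + d.length) := by
  intro d
  induction d with
  | nil =>
    intro _ fuel pre r _ hr hN
    match fuel with
    | 0 => simp [pvWhile1]
    | fuel + 1 =>
      rw [pvWhile1]
      rcases hr with rfl | ⟨r', rfl⟩
      · have : ¬ (pre.length < N ∧ (pre ++ [] ++ []).getD pre.length "" ≠ "#") := by
          simp at hN; omega
        rw [if_neg this]; simp
      · have hget : (pre ++ [] ++ "#" :: r').getD pre.length "" = "#" := by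
          have := pv_getD_append pre ("#" :: r') 0 ""
          simpa using this
        rw [if_neg (by rw [hget]; simp)]
        simp
  | cons x d ih =>
    intro hx fuel pre r hfuel hr hN
    match fuel with
    | fuel + 1 =>
      rw [pvWhile1]
      have hget : (pre ++ x :: d ++ r).getD pre.length "" = x := by
        have := pv_getD_append pre (x :: d ++ r) 0 ""
        simpa using this
      rw [if_pos (by rw [hget]; exact ⟨by simp [hN], hx x (by simp)⟩)]
      have hset : (pre ++ x :: d ++ r).set pre.length "."
          = (pre ++ ["."]) ++ d ++ r := by
        have := pv_set_append pre (x :: d ++ r) 0 "."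
        simpa using this
      have hlen : pre.length + 1 = (pre ++ ["."]).length := by simp
      rw [hset, hlen, ih (fun y hy => hx y (by simp [hy])) fuel (pre ++ ["."]) r
        (by simp at hfuel ⊢; omega) hr (by simp at hN ⊢; omega)]
      simp only [Prod.mk.injEq]
      refine ⟨?_, by simp; omega⟩
      simp [List.replicate_succ]

theorem pv_bodyA1_run (N : Nat) (pre s rest : List String)
    (hs : ∀ x ∈ s, x ≠ "#") (hr : rest = [] ∨ ∃ r', rest = "#" :: r')
    (hN : N = (pre ++ s ++ rest).length) :
    pvBodyA1 N (pre ++ s ++ rest, pre.length) (s.count "O")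
      = (pre ++ (List.replicate (s.count "O") "O" ++ List.replicate (s.length - s.count "O") ".") ++ rest,
         pre.length + s.length + (if rest = [] then 0 else 1)) := by
  have hk : s.count "O" ≤ s.length := List.count_le_length
  rw [pvBodyA1]
  have hw : (pre ++ s ++ rest) = pre ++ (s ++ rest) := by simp
  rw [hw, pv_writeOs pre (s ++ rest) (s.count "O") (by simp; omega)]
  simp only
  rw [List.drop_append_of_le_length hk]
  have h1 : pre ++ List.replicate (s.count "O") "O" ++ (s.drop (s.count "O") ++ rest)
      = (pre ++ List.replicate (s.count "O") "O") ++ s.drop (s.count "O") ++ rest := by simp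
  have h2 : pre.length + s.count "O" = (pre ++ List.replicate (s.count "O") "O").length := by simp
  rw [h1, h2, pv_while1_run N (s.drop (s.count "O"))
    (fun y hy => hs y (List.mem_of_mem_drop hy)) N
    (pre ++ List.replicate (s.count "O") "O") rest
    (by simp [hN]; omega) hr (by simp [hN]; omega)]
  simp only
  rcases hr with rfl | ⟨r', rfl⟩
  · rw [if_neg (by simp [hN]; omega)]
    simp only [Prod.mk.injEq, if_pos rfl]
    constructor
    · simp
    · simp; omega
  · have hpref : ((pre ++ List.replicate (s.count "O") "O") ++ List.replicate (s.drop (s.count "O")).length "." ++ ("#" :: r')).getD ((pre ++ List.replicate (s.count "O") "O").length + (s.drop (s.count "O")).length) "" = "#" := by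
      have h3 : ((pre ++ List.replicate (s.count "O") "O") ++ List.replicate (s.drop (s.count "O")).length "." ++ ("#" :: r'))
          = ((pre ++ List.replicate (s.count "O") "O") ++ List.replicate (s.drop (s.count "O")).length ".") ++ ("#" :: r') := by simp
      have h4 : (pre ++ List.replicate (s.count "O") "O").length + (s.drop (s.count "O")).length
          = ((pre ++ List.replicate (s.count "O") "O") ++ List.replicate (s.drop (s.count "O")).length ".").length + 0 := by simp; omega
      rw [h3, h4, pv_getD_append]
      simp
    rw [if_pos ⟨by simp [hN]; omega, by rw [hpref]⟩]
    simp only [Prod.mk.injEq]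
    constructor
    · simp
    · simp; omega

theorem pv_countAux_nohash (s : List String) (hs : ∀ x ∈ s, x ≠ "#") :
    ∀ r, pvCountAux s r = [r + s.count "O"] := by
  induction s with
  | nil => intro r; simp [pvCountAux]
  | cons x xs ih =>
    intro r
    rw [pvCountAux]
    simp only [if_neg (hs x (by simp))]
    rw [ih (fun y hy => hs y (by simp [hy]))]
    by_cases hx : x = "O" <;> simp [hx, List.count_cons] <;> omega

theorem pv_countAux_hash (s rest : List String) (hs : ∀ x ∈ s, x ≠ "#") :
    ∀ r, pvCountAux (s ++ "#" :: rest) r = (r + s.count "O") :: pvCountAux rest 0 := by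
  induction s with
  | nil => intro r; simp [pvCountAux]
  | cons x xs ih =>
    intro r
    rw [List.cons_append, pvCountAux]
    simp only [if_neg (hs x (by simp))]
    rw [ih (fun y hy => hs y (by simp [hy]))]
    by_cases hx : x = "O" <;> simp [hx, List.count_cons] <;> omega

theorem pv_range_getD_foldl {β : Type} (f : β → String → β) :
    ∀ (c : List String) (z : β),
      (List.range c.length).foldl (fun p i => f p (c.getD i "")) z = c.foldl f z := by
  intro c
  induction c with
  | nil => intro z; rfl
  | cons x xs ih =>
    intro z
    rw [List.length_cons, List.range_succ_eq_map, List.foldl_cons, List.foldl_map]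
    simp only [List.getD_cons_zero, List.getD_cons_succ]
    rw [ih (f z x), List.foldl_cons]

theorem pv_countfold (c : List String) :
    ∀ (r : Nat) (acc : List Nat),
      (let p := c.foldl (fun (p : Nat × List Nat) x =>
         let r := if x = "O" then p.1 + 1 else p.1
         if x = "#" then (0, p.2 ++ [r]) else (r, p.2)) (r, acc)
       p.2 ++ [p.1]) = acc ++ pvCountAux c r := by
  induction c with
  | nil => intro r acc; simp [pvCountAux]
  | cons x xs ih =>
    intro r acc
    rw [List.foldl_cons, pvCountAux]
    by_cases hx : x = "#"
    · simp only [hx, if_pos rfl, reduceIte]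
      rw [ih 0 _]
      simp
    · simp only [if_neg hx]
      rw [ih _ acc]

theorem pv_countColA_eq (g : List (List String)) (j : Nat) :
    pvCountColA g g.length j = pvCountAux (pvCol g j) 0 := by
  rw [pvCountColA]
  simp only [pv_getC_col]
  have hlen : g.length = (pvCol g j).length := by simp [pvCol]
  rw [hlen]
  have := pv_range_getD_foldl (fun (p : Nat × List Nat) x =>
    let r := if x = "O" then p.1 + 1 else p.1
    if x = "#" then (0, p.2 ++ [r]) else (r, p.2)) (pvCol g j) (0, [])
  simp only at this ⊢
  rw [this]
  have h2 := pv_countfold (pvCol g j) 0 []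
  simpa using h2

theorem pv_takeWhile_ne (c : List String) :
    ∀ x ∈ c.takeWhile (fun x => x ≠ "#"), x ≠ "#" := by
  intro x hx
  have := List.mem_takeWhile_imp hx
  simpa using this

theorem pv_roll_eq_nil (c : List String) (h : c.dropWhile (fun x => x ≠ "#") = []) :
    pvRoll c = List.replicate ((c.takeWhile (fun x => x ≠ "#")).count "O") "O"
      ++ List.replicate ((c.takeWhile (fun x => x ≠ "#")).length - (c.takeWhile (fun x => x ≠ "#")).count "O") "." := by
  rw [pvRoll]
  split
  · rfl
  · rename_i y rest heq
    rw [h] at heq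
    cases heq

theorem pv_roll_eq_cons (c : List String) (y : String) (rest : List String)
    (h : c.dropWhile (fun x => x ≠ "#") = y :: rest) :
    pvRoll c = (List.replicate ((c.takeWhile (fun x => x ≠ "#")).count "O") "O"
      ++ List.replicate ((c.takeWhile (fun x => x ≠ "#")).length - (c.takeWhile (fun x => x ≠ "#")).count "O") ".")
      ++ "#" :: pvRoll rest := by
  rw [pvRoll]
  split
  · rename_i heq
    rw [h] at heq
    cases heq
  · rename_i y' rest' heq
    rw [h] at heq
    cases heq
    rfl

theorem pv_dropWhile_head : ∀ (c : List String) (y : String) (rest : List String),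
    c.dropWhile (fun x => x ≠ "#") = y :: rest → y = "#" := by
  intro c
  induction c with
  | nil => intro y rest h; cases h
  | cons a c ih =>
    intro y rest h
    rw [List.dropWhile_cons] at h
    split at h
    · exact ih _ _ h
    · rename_i ha
      cases h
      simpa using ha

theorem pv_roll_length (c : List String) : (pvRoll c).length = c.length := by
  induction c using pvRoll.induct with
  | case1 c h =>
    rw [pv_roll_eq_nil c h]
    have hsplit := List.takeWhile_append_dropWhile (p := fun x => x ≠ "#") (l := c)
    rw [h, List.append_nil] at hsplit
    have hk : (c.takeWhile (fun x => x ≠ "#")).count "O" ≤ (c.takeWhile (fun x => x ≠ "#")).length :=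
      List.count_le_length
    simp only [List.length_append, List.length_replicate]
    conv_rhs => rw [← hsplit]
    omega
  | case2 c y rest h ih =>
    rw [pv_roll_eq_cons c y rest h]
    have hsplit := List.takeWhile_append_dropWhile (p := fun x => x ≠ "#") (l := c)
    rw [h] at hsplit
    have hk : (c.takeWhile (fun x => x ≠ "#")).count "O" ≤ (c.takeWhile (fun x => x ≠ "#")).length :=
      List.count_le_length
    simp only [List.length_append, List.length_replicate, List.length_cons, ih]
    conv_rhs => rw [← hsplit]
    simp only [List.length_append, List.length_cons]
    omega

theorem pv_A_main (N : Nat) : ∀ (c pre : List String), N = pre.length + c.length →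
    (pvCountAux c 0).foldl (pvBodyA1 N) (pre ++ c, pre.length) = (pre ++ pvRoll c, N) := by
  intro c
  induction c using pvRoll.induct with
  | case1 c h =>
    intro pre hN
    have hsplit := List.takeWhile_append_dropWhile (p := fun x => x ≠ "#") (l := c)
    rw [h, List.append_nil] at hsplit
    have hs := pv_takeWhile_ne c
    rw [hsplit] at hs
    rw [pv_countAux_nohash c hs 0]
    simp only [List.foldl_cons, List.foldl_nil, Nat.zero_add]
    have hrun := pv_bodyA1_run N pre c [] hs (Or.inl rfl) (by simp [hN])
    rw [List.append_nil] at hrun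
    rw [hrun, pv_roll_eq_nil c h, hsplit]
    simp [hN]
  | case2 c y rest h ih =>
    intro pre hN
    have hy := pv_dropWhile_head c y rest h
    subst hy
    have hsplit := List.takeWhile_append_dropWhile (p := fun x => x ≠ "#") (l := c)
    rw [h] at hsplit
    have hs' := pv_takeWhile_ne c
    set s := c.takeWhile (fun x => x ≠ "#") with hsdef
    have hc : c = s ++ "#" :: rest := hsplit.symm
    rw [hc, pv_countAux_hash s rest hs' 0]
    simp only [List.foldl_cons, Nat.zero_add]
    have hassoc : pre ++ (s ++ "#" :: rest) = pre ++ s ++ "#" :: rest := by simp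
    rw [hassoc]
    have hrun := pv_bodyA1_run N pre s ("#" :: rest) hs' (Or.inr ⟨rest, rfl⟩)
      (by rw [hc] at hN; simp [hN])
    rw [hrun, if_neg (by simp)]
    set filled := List.replicate (s.count "O") "O" ++ List.replicate (s.length - s.count "O") "." with hf
    have hflen : filled.length = s.length := by
      have : s.count "O" ≤ s.length := List.count_le_length
      simp [hf]; omega
    have hre : pre ++ filled ++ "#" :: rest = (pre ++ filled ++ ["#"]) ++ rest := by simp
    have hre2 : pre.length + s.length + 1 = (pre ++ filled ++ ["#"]).length := by
      simp [hflen]; omega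
    rw [hre, hre2, ih (pre ++ filled ++ ["#"]) (by rw [hc] at hN; simp [hflen, hN]; omega)]
    rw [hsplit, pv_roll_eq_cons c "#" rest h, ← hsdef, ← hf]
    simp

theorem pv_segB : ∀ (d : List String), (∀ x ∈ d, x ≠ "#") →
    ∀ (pre : List String) (m : Nat) (rest : List String),
    (List.range' (pre.length + m) d.length).foldl pvBodyB1
        (pre ++ List.replicate m "." ++ d ++ rest, pre.length)
      = (pre ++ List.replicate (d.count "O") "O" ++ List.replicate (m + d.length - d.count "O") "." ++ rest,
         pre.length + d.count "O") := by
  intro d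
  induction d with
  | nil => intro _ pre m rest; simp
  | cons x d ih =>
    intro hx pre m rest
    rw [List.length_cons, List.range'_succ, List.foldl_cons]
    have hget : (pre ++ List.replicate m "." ++ x :: d ++ rest).getD (pre.length + m) "" = x := by
      have h1 : pre ++ List.replicate m "." ++ x :: d ++ rest
          = (pre ++ List.replicate m ".") ++ (x :: (d ++ rest)) := by simp
      have h2 : pre.length + m = (pre ++ List.replicate m ".").length + 0 := by simp
      rw [h1, h2, pv_getD_append]
      rfl
    rw [pvBodyB1]
    simp only [hget]
    rw [if_neg (hx x (by simp))]
    have hset : (pre ++ List.replicate m "." ++ x :: d ++ rest).set (pre.length + m) "."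
        = pre ++ List.replicate (m + 1) "." ++ d ++ rest := by
      have h1 : pre ++ List.replicate m "." ++ x :: d ++ rest
          = (pre ++ List.replicate m ".") ++ (x :: (d ++ rest)) := by simp
      have h2 : pre.length + m = (pre ++ List.replicate m ".").length + 0 := by simp
      rw [h1, h2, pv_set_append]
      simp [List.replicate_succ']
    rw [hset]
    by_cases hO : x = "O"
    · rw [if_pos hO]
      have hset2 : (pre ++ List.replicate (m + 1) "." ++ d ++ rest).set pre.length "O"
          = (pre ++ ["O"]) ++ List.replicate m "." ++ d ++ rest := by
        have h1 : pre ++ List.replicate (m + 1) "." ++ d ++ rest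
            = pre ++ ("." :: (List.replicate m "." ++ d ++ rest)) := by simp [List.replicate_succ]
        have h2 : pre.length = pre.length + 0 := rfl
        rw [h1, h2, pv_set_append]
        simp
      rw [hset2]
      have hidx : pre.length + m + 1 = (pre ++ ["O"]).length + m := by simp; omega
      have hw : pre.length + 1 = (pre ++ ["O"]).length := by simp
      rw [hidx, hw, ih (fun y hy => hx y (by simp [hy])) (pre ++ ["O"]) m rest]
      simp only [Prod.mk.injEq]
      constructor
      · simp only [hO, List.length_cons]
        have h1 : List.count "O" ("O" :: d) = List.count "O" d + 1 := by simp
        rw [h1]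
        have h2 : m + (d.length + 1) - (List.count "O" d + 1) = m + d.length - List.count "O" d := by omega
        rw [h2, List.replicate_succ]
        simp
      · simp only [hO, List.length_cons]
        have h1 : List.count "O" ("O" :: d) = List.count "O" d + 1 := by simp
        rw [h1]
        omega
    · rw [if_neg hO]
      have hidx : pre.length + m + 1 = pre.length + (m + 1) := by omega
      rw [hidx, ih (fun y hy => hx y (by simp [hy])) pre (m + 1) rest]
      simp only [Prod.mk.injEq]
      constructor
      · have : (x :: d).count "O" = d.count "O" := by
          simp [List.count_cons, hO]
        rw [this]
        have harith : m + 1 + d.length - d.count "O" = m + (d.length + 1) - d.count "O" := by omega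
        rw [harith]
      · simp [List.count_cons, hO]

theorem pv_B_main (c : List String) : ∀ (pre : List String), ∃ w,
    (List.range' pre.length c.length).foldl pvBodyB1 (pre ++ c, pre.length)
      = (pre ++ pvRoll c, w) := by
  induction c using pvRoll.induct with
  | case1 c h =>
    intro pre
    have hs : ∀ x ∈ c, x ≠ "#" := by
      intro x hx
      have := (List.dropWhile_eq_nil_iff.mp h) x hx
      simpa using this
    have htake : c.takeWhile (fun x => x ≠ "#") = c := by
      have hsplit := List.takeWhile_append_dropWhile (p := fun x => x ≠ "#") (l := c)
      rw [h, List.append_nil] at hsplit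
      exact hsplit
    refine ⟨pre.length + c.count "O", ?_⟩
    have hseg := pv_segB c hs pre 0 []
    simp only [List.replicate_zero, List.append_nil, List.nil_append, Nat.add_zero,
      List.append_assoc] at hseg ⊢
    rw [hseg, pv_roll_eq_nil c h, htake]
    simp
  | case2 c y rest h ih =>
    intro pre
    have hy := pv_dropWhile_head c y rest h
    subst hy
    have hsplit := List.takeWhile_append_dropWhile (p := fun x => x ≠ "#") (l := c)
    rw [h] at hsplit
    have hs' := pv_takeWhile_ne c
    set s := c.takeWhile (fun x => x ≠ "#") with hsdef
    have hc : c = s ++ "#" :: rest := hsplit.symm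
    have hclen : c.length = s.length + (1 + rest.length) := by rw [hc]; simp; omega
    rw [hclen, List.range'_append_1.symm, List.foldl_append]
    have hseg := pv_segB s hs' pre 0 ("#" :: rest)
    simp only [List.replicate_zero, List.append_nil, List.nil_append, Nat.add_zero] at hseg
    have hstate : pre ++ c = pre ++ s ++ "#" :: rest := by rw [hc]; simp
    rw [hstate]
    have hseg' : List.foldl pvBodyB1 (pre ++ s ++ "#" :: rest, pre.length) (List.range' pre.length s.length)
        = (pre ++ List.replicate (s.count "O") "O" ++ List.replicate (s.length - s.count "O") "." ++ ("#" :: rest),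
           pre.length + s.count "O") := by
      have h1 : pre ++ s ++ "#" :: rest = pre ++ (s ++ "#" :: rest) := by simp
      rw [h1]
      simpa using hseg
    rw [hseg']
    set filled := List.replicate (s.count "O") "O" ++ List.replicate (s.length - s.count "O") "." with hf
    have hflen : filled.length = s.length := by
      have : s.count "O" ≤ s.length := List.count_le_length
      simp [hf]; omega
    have hr1 : (1 + rest.length) = rest.length + 1 := by omega
    rw [hr1, List.range'_succ, List.foldl_cons]
    have hP : pre ++ List.replicate (s.count "O") "O" ++ List.replicate (s.length - s.count "O") "." ++ "#" :: rest
        = (pre ++ filled) ++ "#" :: rest := by simp [hf]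
    have hPlen : (pre ++ filled).length = pre.length + s.length := by simp [hflen]
    rw [pvBodyB1]
    simp only [hP]
    have hget : ((pre ++ filled) ++ "#" :: rest).getD (pre.length + s.length) "" = "#" := by
      have h2 : pre.length + s.length = (pre ++ filled).length + 0 := by rw [hPlen]; omega
      rw [h2, pv_getD_append]
      rfl
    rw [if_pos hget]
    have hre : (pre ++ filled) ++ "#" :: rest = (pre ++ filled ++ ["#"]) ++ rest := by simp
    have hre2 : pre.length + s.length + 1 = (pre ++ filled ++ ["#"]).length := by
      simp [hflen]; omega
    rw [hre, hre2]
    obtain ⟨w, hw⟩ := ih (pre ++ filled ++ ["#"])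
    refine ⟨w, ?_⟩
    rw [hw, pv_roll_eq_cons c "#" rest h, ← hsdef, ← hf]
    simp

theorem pv_stepA (g : List (List String)) (j : Nat) (hd : ∀ row ∈ g, j < row.length) :
    ((pvCountAux (pvCol g j) 0).foldl (pvBodyA j g.length) (g, 0)).1
      = pvWriteCol g j (pvRoll (pvCol g j)) := by
  have hcl : (pvCol g j).length = g.length := by simp [pvCol]
  have hlift := pv_foldl_lift g j (pvBodyA j g.length) (pvBodyA1 g.length)
    (fun c i num hc => pv_bodyA_lift g j g.length hd c i num hc)
    (fun c i num _ => pv_bodyA1_len g.length (c, i) num)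
    (pvCountAux (pvCol g j) 0) (pvCol g j) 0 hcl
  rw [show (g, 0) = (pvWriteCol g j (pvCol g j), (0 : Nat)) by rw [pv_writeCol_col g j hd]]
  rw [hlift]
  have hmain := pv_A_main g.length (pvCol g j) [] (by simp [hcl])
  simp only [List.nil_append, List.length_nil] at hmain
  rw [hmain]

theorem pv_stepB (g : List (List String)) (j : Nat) (hd : ∀ row ∈ g, j < row.length) :
    ((List.range g.length).foldl (pvBodyB j) (g, 0)).1
      = pvWriteCol g j (pvRoll (pvCol g j)) := by
  have hcl : (pvCol g j).length = g.length := by simp [pvCol]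
  have hlift := pv_foldl_lift g j (pvBodyB j) pvBodyB1
    (fun c i k hc => pv_bodyB_lift g j hd c i k hc)
    (fun c i k _ => pv_bodyB1_len (c, i) k)
    (List.range g.length) (pvCol g j) 0 hcl
  rw [show (g, 0) = (pvWriteCol g j (pvCol g j), (0 : Nat)) by rw [pv_writeCol_col g j hd]]
  rw [hlift]
  obtain ⟨w, hw⟩ := pv_B_main (pvCol g j) []
  simp only [List.nil_append, List.length_nil] at hw
  rw [List.range_eq_range', ← hcl, hw]

theorem pv_outer (f0 : List (List String)) (m : Nat) :
    ∀ (js : List Nat) (g : List (List String)), js.Nodup → (∀ j ∈ js, j < m) →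
    g.length = f0.length → (∀ row ∈ g, m ≤ row.length) →
    (∀ j ∈ js, pvCol g j = pvCol f0 j) →
    js.foldl (fun g j => (((count_round_stones_vert f0 m f0.length).getD j []).foldl (pvBodyA j f0.length) (g, 0)).1) g
      = js.foldl (fun g j => ((List.range f0.length).foldl (pvBodyB j) (g, 0)).1) g := by
  intro js
  induction js with
  | nil => intro g _ _ _ _ _; rfl
  | cons j js ih =>
    intro g hnodup hjm hn hrow hcols
    rw [List.foldl_cons, List.foldl_cons]
    have hj : j < m := hjm j (by simp)
    have hd : ∀ row ∈ g, j < row.length := fun row hr => lt_of_lt_of_le hj (hrow row hr)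
    have hcounts : (count_round_stones_vert f0 m f0.length).getD j [] = pvCountAux (pvCol g j) 0 := by
      rw [count_round_stones_vert]
      rw [List.getD_eq_getElem _ _ (by simpa using hj)]
      simp only [List.getElem_map, List.getElem_range]
      rw [pv_countColA_eq, hcols j (by simp)]
    have hstep : (((count_round_stones_vert f0 m f0.length).getD j []).foldl (pvBodyA j f0.length) (g, 0)).1
        = ((List.range f0.length).foldl (pvBodyB j) (g, 0)).1 := by
      rw [hcounts, ← hn, pv_stepA g j hd, pv_stepB g j hd]
    rw [hstep]
    set g' := ((List.range f0.length).foldl (pvBodyB j) (g, 0)).1 with hg'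
    have hg'val : g' = pvWriteCol g j (pvRoll (pvCol g j)) := by
      rw [hg', ← hn, pv_stepB g j hd]
    have hcl : (pvRoll (pvCol g j)).length = g.length := by
      rw [pv_roll_length]; simp [pvCol]
    refine ih g' ((List.nodup_cons.mp hnodup).2) (fun j' hj' => hjm j' (by simp [hj']))
      ?_ ?_ ?_
    · rw [hg'val, pv_writeCol_length g j _ hcl, hn]
    · intro row hr
      rw [hg'val] at hr
      obtain ⟨row0, hr0, hlen⟩ := pv_writeCol_rows g j _ row hr
      rw [hlen]; exact hrow row0 hr0
    · intro j' hj'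
      have hne : j' ≠ j := by
        intro hEq; exact (List.nodup_cons.mp hnodup).1 (hEq ▸ hj')
      rw [hg'val, pv_col_writeCol_ne g j j' _ hne hcl]
      exact hcols j' (by simp [hj'])

theorem pv_final (field : List (List String))
    (hrow : ∀ row ∈ field, (field.headD []).length ≤ row.length) :
    roll_stones_north field = roll_stones_north_alt field := by
  rw [roll_stones_north, roll_stones_north_alt]
  exact pv_outer field (field.headD []).length (List.range (field.headD []).length) field
    (List.nodup_range) (fun j hj => by simpa using hj) rfl hrow (fun _ _ => rfl)

-- ===== VERDICT (by name: the statement is the Claim_ definition above) =====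
theorem roll_stones_north_spec : Claim_equal_roll_stones_north := by
  intro field _hdom hpre
  unfold Spec_roll_stones_north
  exact pv_final field hpre.2
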